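-- pv_equiv track=rewrite | github.com/fsdsa/lekiwi-nav-env | train_bc_act.py | _split_contiguous
-- ===== SOURCE A (Python) =====
-- def _split_contiguous(obs, acts, active):
--     segs, start = [], None
--     for t in range(len(active)):
--         if active[t]:
--             if start is None:
--                 start = t
--         else:
--             if start is not None and (t - start) >= 2:
--                 segs.append((obs[start:t], acts[start:t]))
--             start = None
--     if start is not None and (len(active) - start) >= 2:
--         segs.append((obs[start:], acts[start:]))
--     return segs
-- ===== SOURCE B (Python) =====
-- def _split_contiguous(obs, acts, active):
--     n = len(active)
--     starts = [i for i in range(n) if active[i] and (i == 0 or not active[i - 1])]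
--     ends = [i + 1 for i in range(n) if active[i] and (i == n - 1 or not active[i + 1])]
--     return [(obs[s:e], acts[s:e]) for s, e in zip(starts, ends) if e - s >= 2]
-- ===== Notes on version B (the rewrite author's own statement) =====
-- stated objective: alternative
-- what changed: Replaced A's per-index sentinel state machine (Optional start plus a duplicated trailing-run check) with staged comprehensions: detect run starts and run ends by comparing each flag with its neighbor, zip the two boundary lists into (start,end) runs, and map a filter+slice over them; there is no scanning state at all.
-- intended difference: When active ends in a run of >=2 True entries and obs or acts is longer than active, A's trailing slice obs[start:]/acts[start:] grabs elements past len(active) while B clips every segment at len(active); B's clipping is the intended parallel-array reading, indices beyond len(active) have no activity flag. — e.g. on _split_contiguous([1, 2, 3], [4, 5], [true, true]): A returns [([1, 2, 3], [4, 5])], B returns [([1, 2], [4, 5])]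
import Mathlib
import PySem

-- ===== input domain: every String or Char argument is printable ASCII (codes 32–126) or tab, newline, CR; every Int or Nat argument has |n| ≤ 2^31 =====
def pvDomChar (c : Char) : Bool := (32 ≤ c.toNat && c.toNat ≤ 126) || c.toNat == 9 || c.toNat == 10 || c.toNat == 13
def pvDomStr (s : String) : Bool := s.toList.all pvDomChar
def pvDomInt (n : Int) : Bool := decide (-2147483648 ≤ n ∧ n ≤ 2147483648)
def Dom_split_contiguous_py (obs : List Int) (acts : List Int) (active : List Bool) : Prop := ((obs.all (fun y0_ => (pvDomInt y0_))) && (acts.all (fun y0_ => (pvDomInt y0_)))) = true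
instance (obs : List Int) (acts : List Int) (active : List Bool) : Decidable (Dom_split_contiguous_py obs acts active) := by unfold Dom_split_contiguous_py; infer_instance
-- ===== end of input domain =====

-- B replaces A's sentinel state machine (Optional start + duplicated post-loop trailing check)
-- by staged comprehensions: run starts/ends found by neighbor comparison, zipped into runs,
-- then filter + slice. Same O(n) cost. Return values agree outside D_ below; inside D_ the
-- two trailing-slice conventions differ (see D_'s comment).

-- ===== PORT A =====
-- loop body of A's 'for t in range(len(active))' (state = (segs, start))
def aStep (obs acts : List Int) (active : List Bool)
    (st : List (List Int × List Int) × Option Int) (t : Int) :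
    List (List Int × List Int) × Option Int :=
  if PySem.List.pyGetD active t false = true then
    match st.2 with
    | none => (st.1, some t)
    | some _ => st
  else
    match st.2 with
    | some s =>
        if 2 ≤ t - s then
          (st.1 ++ [(PySem.List.slice obs (some s) (some t),
                     PySem.List.slice acts (some s) (some t))], none)
        else (st.1, none)
    | none => (st.1, none)

-- A's trailing-run check after the loop
def aFinish (obs acts : List Int) (active : List Bool)
    (st : List (List Int × List Int) × Option Int) : List (List Int × List Int) :=
  match st.2 with
  | some s =>
      if 2 ≤ (active.length : Int) - s then
        st.1 ++ [(PySem.List.slice obs (some s) none, PySem.List.slice acts (some s) none)]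
      else st.1
  | none => st.1

def split_contiguous_py (obs : List Int) (acts : List Int) (active : List Bool) :
    List (List Int × List Int) :=
  aFinish obs acts active
    ((PySem.List.pyRange 0 (active.length : Int)).foldl (aStep obs acts active) ([], none))

-- ===== PORT B =====
-- B's start-of-run test: 'active[i] and (i == 0 or not active[i-1])'
def bStart (active : List Bool) (i : Nat) : Bool :=
  active.getD i false && ((i == 0) || !(active.getD (i - 1) false))

-- B's end-of-run test: 'active[i] and (i == n - 1 or not active[i+1])'
def bEnd (active : List Bool) (i : Nat) : Bool :=
  active.getD i false && ((i == active.length - 1) || !(active.getD (i + 1) false))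

-- body of B's final comprehension: '(obs[s:e], acts[s:e]) … if e - s >= 2'
def bSeg (obs acts : List Int) (se : Nat × Nat) : Option (List Int × List Int) :=
  if 2 ≤ se.2 - se.1 then
    some (PySem.List.slice obs (some (se.1 : Int)) (some (se.2 : Int)),
          PySem.List.slice acts (some (se.1 : Int)) (some (se.2 : Int)))
  else none

def split_contiguous_py_alt (obs : List Int) (acts : List Int) (active : List Bool) :
    List (List Int × List Int) :=
  (((List.range active.length).filter (bStart active)).zip
    (((List.range active.length).filter (bEnd active)).map (fun i => i + 1))).filterMap
    (bSeg obs acts)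

-- ===== PRECONDITION & SPEC =====
-- When active ends in a run of >= 2 True entries and obs or acts is longer than active, A's
-- trailing slice obs[start:]/acts[start:] grabs elements past len(active) while B clips every
-- segment at len(active); B's clipping is the intended parallel-array reading (indices beyond
-- len(active) carry no activity flag).
def D_split_contiguous_py (obs : List Int) (acts : List Int) (active : List Bool) : Prop :=
  2 ≤ active.length ∧
  active.getD (active.length - 1) false = true ∧
  active.getD (active.length - 2) false = true ∧
  (active.length < obs.length ∨ active.length < acts.length)
instance (obs : List Int) (acts : List Int) (active : List Bool) :
    Decidable (D_split_contiguous_py obs acts active) := by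
  unfold D_split_contiguous_py; infer_instance

def Spec_split_contiguous_py (obs : List Int) (acts : List Int) (active : List Bool)
    (out : List (List Int × List Int)) : Prop :=
  ¬ D_split_contiguous_py obs acts active → out = split_contiguous_py_alt obs acts active
instance (obs : List Int) (acts : List Int) (active : List Bool)
    (out : List (List Int × List Int)) :
    Decidable (Spec_split_contiguous_py obs acts active out) := by
  unfold Spec_split_contiguous_py; infer_instance

def pvDiffWitness_split_contiguous_py : List Int × List Int × List Bool :=
  ([1, 2, 3], [4, 5], [true, true])
def pvDiffWitnessOut_split_contiguous_py :
    (List (List Int × List Int)) × (List (List Int × List Int)) :=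
  ([([1, 2, 3], [4, 5])], [([1, 2], [4, 5])])

-- ===== CLAIM (what is proved, stated in full; the proofs are below) =====
def Claim_unchanged_split_contiguous_py : Prop := ∀ (obs : List Int) (acts : List Int) (active : List Bool), Dom_split_contiguous_py obs acts active → Spec_split_contiguous_py obs acts active (split_contiguous_py obs acts active)
def Claim_changed_split_contiguous_py : Prop := Dom_split_contiguous_py (pvDiffWitness_split_contiguous_py.1) (pvDiffWitness_split_contiguous_py.2.1) (pvDiffWitness_split_contiguous_py.2.2) ∧ D_split_contiguous_py (pvDiffWitness_split_contiguous_py.1) (pvDiffWitness_split_contiguous_py.2.1) (pvDiffWitness_split_contiguous_py.2.2) ∧ split_contiguous_py (pvDiffWitness_split_contiguous_py.1) (pvDiffWitness_split_contiguous_py.2.1) (pvDiffWitness_split_contiguous_py.2.2) = pvDiffWitnessOut_split_contiguous_py.1 ∧ split_contiguous_py_alt (pvDiffWitness_split_contiguous_py.1) (pvDiffWitness_split_contiguous_py.2.1) (pvDiffWitness_split_contiguous_py.2.2) = pvDiffWitnessOut_split_contiguous_py.2 ∧ pvDiffWitnessOut_split_contiguous_py.1 ≠ pvDiffWitnessOu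t_split_contiguous_py.2
def Claim_exact_split_contiguous_py : Prop := ∀ (obs : List Int) (acts : List Int) (active : List Bool), Dom_split_contiguous_py obs acts active → D_split_contiguous_py obs acts active → split_contiguous_py obs acts active ≠ split_contiguous_py_alt obs acts active

-- ===== LEMMAS AND PROOFS =====

-- maximal-run end: smallest j ≥ i with j = n or active[j] false (proof-side notion)
def runEnd (active : List Bool) (j : Nat) : Nat :=
  if h : j < active.length ∧ active.getD j false = true then runEnd active (j + 1) else j
termination_by active.length - j
decreasing_by omega

theorem le_runEnd (active : List Bool) (j : Nat) : j ≤ runEnd active j := by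
  fun_induction runEnd <;> omega

theorem lt_runEnd (active : List Bool) (j : Nat) (h : j < active.length)
    (hb : active.getD j false = true) : j < runEnd active j := by
  rw [runEnd, dif_pos ⟨h, hb⟩]
  have := le_runEnd active (j + 1); omega

theorem runEnd_le (active : List Bool) (j : Nat) (h : j ≤ active.length) :
    runEnd active j ≤ active.length := by
  fun_induction runEnd <;> omega

theorem runEnd_stop (active : List Bool) (j : Nat) :
    ¬ (runEnd active j < active.length ∧ active.getD (runEnd active j) false = true) := by
  fun_induction runEnd with
  | case1 j h ih => exact ih
  | case2 j h => exact h

theorem runEnd_true (active : List Bool) (j : Nat) :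
    ∀ t, j ≤ t → t < runEnd active j → active.getD t false = true := by
  fun_induction runEnd with
  | case1 j h ih =>
      intro t h1 h2
      by_cases ht : t = j
      · subst ht; exact h.2
      · exact ih t (by omega) h2
  | case2 j h => intro t h1 h2; omega

theorem runEnd_eq_succ (active : List Bool) (j : Nat) (h : j < active.length)
    (hb : active.getD j false = true) : runEnd active j = runEnd active (j + 1) := by
  rw [runEnd, dif_pos ⟨h, hb⟩]

theorem runEnd_eq_self (active : List Bool) (j : Nat)
    (h : ¬ (j < active.length ∧ active.getD j false = true)) : runEnd active j = j := by
  rw [runEnd, dif_neg h]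

-- A-shaped run form: runs extracted in order, a run reaching the end of active sliced open
-- (obs[s:], acts[s:]) exactly as A's trailing check does.
def goA (obs acts : List Int) (active : List Bool) (i : Nat) : List (List Int × List Int) :=
  if h : i < active.length then
    if hb : active.getD i false = true then
      (if 2 ≤ runEnd active i - i then
        [(if runEnd active i = active.length then PySem.List.slice obs (some (i : Int)) none
          else PySem.List.slice obs (some (i : Int)) (some (runEnd active i : Int)),
          if runEnd active i = active.length then PySem.List.slice acts (some (i : Int)) none
          else PySem.List.slice acts (some (i : Int)) (some (runEnd active i : Int)))]
       else []) ++ goA obs acts active (runEnd active i)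
    else goA obs acts active (i + 1)
  else []
termination_by active.length - i
decreasing_by
  · have := lt_runEnd active i h hb; omega
  · omega

-- B-shaped (clipped) run form: same runs, every slice clipped at the run end
def goC (obs acts : List Int) (active : List Bool) (i : Nat) : List (List Int × List Int) :=
  if h : i < active.length then
    if hb : active.getD i false = true then
      (if 2 ≤ runEnd active i - i then
        [(PySem.List.slice obs (some (i : Int)) (some (runEnd active i : Int)),
          PySem.List.slice acts (some (i : Int)) (some (runEnd active i : Int)))]
       else []) ++ goC obs acts active (runEnd active i)
    else goC obs acts active (i + 1)
  else []
termination_by active.length - i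
decreasing_by
  · have := lt_runEnd active i h hb; omega
  · omega

theorem main_loop (obs acts : List Int) (active : List Bool) :
    ∀ k i segs, i + k = active.length →
      (aFinish obs acts active
        ((PySem.List.pyRange (i : Int) (active.length : Int)).foldl
          (aStep obs acts active) (segs, none)) = segs ++ goA obs acts active i)
      ∧ (∀ s : Nat, s < i → (∀ t, s ≤ t → t < i → active.getD t false = true) →
          aFinish obs acts active
            ((PySem.List.pyRange (i : Int) (active.length : Int)).foldl
              (aStep obs acts active) (segs, some (s : Int)))
          = segs ++
            (if 2 ≤ runEnd active i - s then
              [(if runEnd active i = active.length then PySem.List.slice obs (some (s : Int)) none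
                else PySem.List.slice obs (some (s : Int)) (some (runEnd active i : Int)),
                if runEnd active i = active.length then PySem.List.slice acts (some (s : Int)) none
                else PySem.List.slice acts (some (s : Int)) (some (runEnd active i : Int)))]
             else []) ++ goA obs acts active (runEnd active i)) := by
  intro k
  induction k with
  | zero =>
    intro i segs h
    have hi : i = active.length := by omega
    subst hi
    have hre : PySem.List.pyRange (active.length : Int) (active.length : Int) = [] := by
      simp [PySem.List.pyRange]
    constructor
    · rw [hre]
      simp only [List.foldl_nil]
      rw [goA, dif_neg (by omega)]
      simp [aFinish]
    · intro s hs hall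
      rw [hre]
      simp only [List.foldl_nil]
      have hrs : runEnd active active.length = active.length :=
        runEnd_eq_self active active.length (by omega)
      rw [hrs, goA, dif_neg (by omega)]
      simp only [aFinish, List.append_nil]
      by_cases hc : 2 ≤ active.length - s
      · rw [if_pos (show (2:Int) ≤ (active.length : Int) - (s : Int) by omega), if_pos hc]
        simp
      · rw [if_neg (show ¬ (2:Int) ≤ (active.length : Int) - (s : Int) by omega), if_neg hc]
        simp
  | succ k ih =>
    intro i segs h
    have hlt : i < active.length := by omega
    rw [PySem.List.pyRange_one_cons (by exact_mod_cast hlt),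
        show ((i : Int) + 1) = ((i + 1 : Nat) : Int) by push_cast; ring]
    constructor
    · simp only [List.foldl_cons]
      by_cases hb : active.getD i false = true
      · have hb2 : active[i]?.getD false = true := by
          rw [← List.getD_eq_getElem?_getD]; exact hb
        have ha : aStep obs acts active (segs, none) (i : Int) = (segs, some (i : Int)) := by
          simp [aStep, PySem.List.pyGetD_natCast, hb2]
        rw [ha, (ih (i + 1) segs (by omega)).2 i (by omega)
              (by intro t h1 h2; rw [show t = i by omega]; exact hb)]
        conv_rhs => rw [goA]
        rw [dif_pos hlt, dif_pos hb, runEnd_eq_succ active i hlt hb]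
        simp [List.append_assoc]
      · have hb2 : ¬ active[i]?.getD false = true := by
          rw [← List.getD_eq_getElem?_getD]; exact hb
        have ha : aStep obs acts active (segs, none) (i : Int) = (segs, none) := by
          simp [aStep, PySem.List.pyGetD_natCast, hb2]
        rw [ha, (ih (i + 1) segs (by omega)).1]
        conv_rhs => rw [goA]
        rw [dif_pos hlt, dif_neg hb]
    · intro s hs hall
      simp only [List.foldl_cons]
      by_cases hb : active.getD i false = true
      · have hb2 : active[i]?.getD false = true := by
          rw [← List.getD_eq_getElem?_getD]; exact hb
        have ha : aStep obs acts active (segs, some (s : Int)) (i : Int)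
            = (segs, some (s : Int)) := by
          simp [aStep, PySem.List.pyGetD_natCast, hb2]
        rw [ha, (ih (i + 1) segs (by omega)).2 s (by omega)
              (by intro t ht1 ht2
                  by_cases he : t = i
                  · rw [he]; exact hb
                  · exact hall t ht1 (by omega)),
            ← runEnd_eq_succ active i hlt hb]
      · have hrs : runEnd active i = i := runEnd_eq_self active i (fun hx => hb hx.2)
        have hg : goA obs acts active i = goA obs acts active (i + 1) := by
          rw [goA, dif_pos hlt, dif_neg hb]
        by_cases hc : 2 ≤ i - s
        · have hb2 : ¬ active[i]?.getD false = true := by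
            rw [← List.getD_eq_getElem?_getD]; exact hb
          have ha : aStep obs acts active (segs, some (s : Int)) (i : Int)
              = (segs ++ [(PySem.List.slice obs (some (s : Int)) (some (i : Int)),
                           PySem.List.slice acts (some (s : Int)) (some (i : Int)))], none) := by
            simp [aStep, PySem.List.pyGetD_natCast, hb2,
              if_pos (show (2:Int) ≤ (i : Int) - (s : Int) by omega)]
          rw [ha, (ih (i + 1) _ (by omega)).1, hrs, if_pos hc,
              if_neg (show ¬ i = active.length by omega),
              if_neg (show ¬ i = active.length by omega), hg]
        · have hb2 : ¬ active[i]?.getD false = true := by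
            rw [← List.getD_eq_getElem?_getD]; exact hb
          have ha : aStep obs acts active (segs, some (s : Int)) (i : Int) = (segs, none) := by
            simp [aStep, PySem.List.pyGetD_natCast, hb2,
              if_neg (show ¬ (2:Int) ≤ (i : Int) - (s : Int) by omega)]
          rw [ha, (ih (i + 1) segs (by omega)).1, hrs, if_neg hc, hg]
          simp

theorem a_eq_goA (obs acts : List Int) (active : List Bool) :
    split_contiguous_py obs acts active = goA obs acts active 0 := by
  have h := (main_loop obs acts active active.length 0 [] (by omega)).1
  simpa [split_contiguous_py] using h

-- a filter over a range' that keeps only the position x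
theorem filter_range'_singleton (P : Nat → Bool) :
    ∀ (len s x : Nat), s ≤ x → x < s + len → P x = true →
      (∀ t, s ≤ t → t < s + len → t ≠ x → P t = false) →
      (List.range' s len).filter P = [x] := by
  intro len
  induction len with
  | zero => intro s x h1 h2; omega
  | succ len ih =>
    intro s x h1 h2 hx hall
    rw [List.range'_succ, List.filter_cons]
    by_cases he : s = x
    · subst he
      rw [if_pos hx]
      have : (List.range' (s + 1) len).filter P = [] := by
        rw [List.filter_eq_nil_iff]
        intro t ht
        rw [List.mem_range'_1] at ht
        simp [hall t (by omega) (by omega) (by omega)]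
      rw [this]
    · rw [if_neg (by simp [hall s (by omega) (by omega) he]),
          ih (s + 1) x (by omega) (by omega) hx (fun t a b c => hall t (by omega) (by omega) c)]

-- B's staged pipeline, restricted to positions ≥ i, equals the clipped run form
theorem goC_eq_pairs (obs acts : List Int) (active : List Bool) :
    ∀ k i, active.length - i = k → i ≤ active.length →
      (i = 0 ∨ active.getD (i - 1) false = false ∨ active.getD i false = false) →
      goC obs acts active i =
        (((List.range' i (active.length - i)).filter (bStart active)).zip
          (((List.range' i (active.length - i)).filter (bEnd active)).map
            (fun t => t + 1))).filterMap (bSeg obs acts) := by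
  intro k
  induction k using Nat.strong_induction_on with
  | _ k ih =>
    intro i hk hle hinv
    by_cases h : i < active.length
    · by_cases hb : active.getD i false = true
      · -- run case
        set j := runEnd active i with hj
        have hij : i < j := lt_runEnd active i h hb
        have hjn : j ≤ active.length := runEnd_le active i (by omega)
        have hjstop := runEnd_stop active i
        have hjF : active.getD j false = false := by
          by_cases hjl : j < active.length
          · by_contra hc
            exact hjstop ⟨hjl, by simpa using hc⟩
          · rw [List.getD_eq_getElem?_getD, List.getElem?_eq_none (by omega)]; rfl
        -- split the range at j
        have hsplit : List.range' i (active.length - i)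
            = List.range' i (j - i) ++ List.range' j (active.length - j) := by
          rw [show active.length - i = (j - i) + (active.length - j) by omega,
              ← List.range'_append_1, show i + (j - i) = j by omega]
        -- start filter on [i, j) = [i]
        have hbq : active[i]?.getD false = true := by
          rw [← List.getD_eq_getElem?_getD]; exact hb
        have hS : (List.range' i (j - i)).filter (bStart active) = [i] := by
          apply filter_range'_singleton _ _ _ i (by omega) (by omega)
          · rcases hinv with h0 | hp | hF
            · subst h0; simp [bStart, hbq]
            · have hpq : active[i - 1]?.getD false = false := by
                rw [← List.getD_eq_getElem?_getD]; exact hp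
              simp [bStart, hbq, hpq]
            · rw [hF] at hb; exact absurd hb (by simp)
          · intro t ht1 ht2 htne
            have hprevq : active[t - 1]?.getD false = true := by
              rw [← List.getD_eq_getElem?_getD]
              exact runEnd_true active i (t - 1) (by omega) (by omega)
            simp [bStart, hprevq, show ¬ t = 0 by omega]
        -- end filter on [i, j) = [j - 1]
        have hE : (List.range' i (j - i)).filter (bEnd active) = [j - 1] := by
          apply filter_range'_singleton _ _ _ (j - 1) (by omega) (by omega)
          · have hlastq : active[j - 1]?.getD false = true := by
              rw [← List.getD_eq_getElem?_getD]
              exact runEnd_true active i (j - 1) (by omega) (by omega)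
            by_cases hjl : j = active.length
            · rw [show j - 1 = active.length - 1 by omega] at hlastq
              simp [bEnd, hlastq, show j - 1 = active.length - 1 by omega]
            · have hjq : active[j]?.getD false = false := by
                rw [← List.getD_eq_getElem?_getD]; exact hjF
              simp [bEnd, hlastq, show j - 1 + 1 = j by omega, hjq]
          · intro t ht1 ht2 htne
            have hnextq : active[t + 1]?.getD false = true := by
              rw [← List.getD_eq_getElem?_getD]
              exact runEnd_true active i (t + 1) (by omega) (by omega)
            simp [bEnd, hnextq, show ¬ t = active.length - 1 by omega]
        have hrec := ih (active.length - j) (by omega) j rfl hjn (Or.inr (Or.inr hjF))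
        rw [goC, dif_pos h, dif_pos hb]
        rw [hsplit, List.filter_append, List.filter_append, hS, hE, hrec, ← hj]
        rw [show ([i] ++ (List.range' j (active.length - j)).filter (bStart active))
              = i :: (List.range' j (active.length - j)).filter (bStart active) by rfl]
        rw [List.singleton_append, List.map_cons, List.zip_cons_cons, List.filterMap_cons]
        rw [show j - 1 + 1 = j by omega]
        by_cases hc : 2 ≤ j - i
        · rw [if_pos hc]
          simp only [bSeg, if_pos (show 2 ≤ (i, j).2 - (i, j).1 from hc)]
          rfl
        · rw [if_neg hc]
          simp only [bSeg, if_neg (show ¬ 2 ≤ (i, j).2 - (i, j).1 from hc)]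
          rfl
      · -- skip case
        have hbF : active.getD i false = false := by simpa using hb
        have hsplit : List.range' i (active.length - i)
            = i :: List.range' (i + 1) (active.length - (i + 1)) := by
          rw [show active.length - i = (active.length - (i + 1)) + 1 by omega, List.range'_succ]
        have hbFq : active[i]?.getD false = false := by
          rw [← List.getD_eq_getElem?_getD]; exact hbF
        rw [goC, dif_pos h, dif_neg hb, hsplit, List.filter_cons, List.filter_cons,
            if_neg (by simp [bStart, hbFq]), if_neg (by simp [bEnd, hbFq]),
            ih (active.length - (i + 1)) (by omega) (i + 1) rfl (by omega)
              (Or.inr (Or.inl (by simpa using hbF)))]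
    · have hi : i = active.length := by omega
      rw [goC, dif_neg h, show active.length - i = 0 by omega]
      rfl

theorem alt_eq_goC (obs acts : List Int) (active : List Bool) :
    split_contiguous_py_alt obs acts active = goC obs acts active 0 := by
  rw [split_contiguous_py_alt,
      goC_eq_pairs obs acts active (active.length - 0) 0 rfl (by omega) (Or.inl rfl),
      List.range_eq_range', Nat.sub_zero]

theorem goA_eq_goC (obs acts : List Int) (active : List Bool)
    (HD : ¬ D_split_contiguous_py obs acts active) (i : Nat) :
    goA obs acts active i = goC obs acts active i := by
  fun_induction goA obs acts active i with
  | case1 i h hb ih =>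
    rw [goC, dif_pos h, dif_pos hb, ← ih]
    congr 1
    by_cases hj : runEnd active i = active.length
    · by_cases hc : 2 ≤ runEnd active i - i
      · have h1 : active.getD (active.length - 1) false = true :=
          runEnd_true active i _ (by omega) (by omega)
        have h2 : active.getD (active.length - 2) false = true :=
          runEnd_true active i _ (by omega) (by omega)
        have hlen : obs.length ≤ active.length ∧ acts.length ≤ active.length := by
          by_contra hcon
          exact HD ⟨by omega, h1, h2, by omega⟩
        have e1 : (obs.drop i).length ≤ active.length - i := by simp; omega
        have e2 : (acts.drop i).length ≤ active.length - i := by simp; omega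
        rw [if_pos hc, if_pos hc, if_pos hj, if_pos hj, hj,
            PySem.List.slice_from_natCast, PySem.List.slice_from_natCast,
            PySem.List.slice_natCast, PySem.List.slice_natCast,
            List.take_of_length_le e1, List.take_of_length_le e2]
      · rw [if_neg hc, if_neg hc]
    · simp [hj]
  | case2 i h hb ih => rw [goC, dif_pos h, dif_neg hb]; exact ih
  | case3 i h => rw [goC, dif_neg h]

theorem goA_ne_goC (obs acts : List Int) (active : List Bool)
    (HD : D_split_contiguous_py obs acts active) :
    ∀ i, i + 2 ≤ active.length → goA obs acts active i ≠ goC obs acts active i := by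
  obtain ⟨hn, h1, h2, hlen⟩ := HD
  intro i
  fun_induction goA obs acts active i with
  | case1 i h hb ih =>
    intro hi
    rw [goC, dif_pos h, dif_pos hb]
    by_cases hj : runEnd active i = active.length
    · have hc : 2 ≤ runEnd active i - i := by omega
      have gnil : goA obs acts active (runEnd active i) = [] := by
        rw [goA, dif_neg (by omega)]
      have cnil : goC obs acts active (runEnd active i) = [] := by
        rw [goC, dif_neg (by omega)]
      rw [if_pos hc, if_pos hc, if_pos hj, if_pos hj, gnil, cnil, hj,
          PySem.List.slice_from_natCast, PySem.List.slice_from_natCast,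
          PySem.List.slice_natCast, PySem.List.slice_natCast]
      simp only [List.append_nil]
      intro hcon
      simp only [List.cons.injEq, Prod.mk.injEq, and_true] at hcon
      rcases hlen with hobs | hacts
      · have := congrArg List.length hcon.1
        simp only [List.length_drop, List.length_take] at this
        omega
      · have := congrArg List.length hcon.2
        simp only [List.length_drop, List.length_take] at this
        omega
    · have hjlt : runEnd active i < active.length := by
        have := runEnd_le active i (by omega); omega
      have hstop := runEnd_stop active i
      have hfalse : ¬ active.getD (runEnd active i) false = true := fun e => hstop ⟨hjlt, e⟩
      have hne1 : runEnd active i ≠ active.length - 1 := fun e => hfalse (e ▸ h1)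
      have hne2 : runEnd active i ≠ active.length - 2 := fun e => hfalse (e ▸ h2)
      rw [if_neg hj, if_neg hj]
      intro hcon
      exact ih (by omega) (List.append_cancel_left hcon)
  | case2 i h hb ih =>
    intro hi
    rw [goC, dif_pos h, dif_neg hb]
    have hne2 : i ≠ active.length - 2 := fun e => hb (e ▸ h2)
    exact ih (by omega)
  | case3 i h => intro hi; omega

-- ===== VERDICT (by name: the statement is the Claim_ definition above) =====
theorem split_contiguous_py_spec : Claim_unchanged_split_contiguous_py := by
  intro obs acts active _ hD
  rw [a_eq_goA, alt_eq_goC, goA_eq_goC obs acts active hD]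

theorem split_contiguous_py_changed : Claim_changed_split_contiguous_py := by
  unfold Claim_changed_split_contiguous_py
  refine ⟨by decide, by decide, by decide, by decide, by decide⟩

theorem split_contiguous_py_tight : Claim_exact_split_contiguous_py := by
  intro obs acts active _ hD
  rw [a_eq_goA, alt_eq_goC]
  exact goA_ne_goC obs acts active hD 0 (by exact hD.1)
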